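-- pv_equiv track=rewrite | github.com/SamJoan/ldap-brute | lib/common.py | or_bruteforce_generator
-- ===== SOURCE A (Python) =====
-- import argparse, logging, string, requests, sys, itertools, timeit
--
-- def or_bruteforce_generator(word_size, charset, size_is_exact):
--     if not size_is_exact:
--         i = 0
--     else:
--         i = word_size - 1
--
--     while i < word_size:
--         i += 1
--         possibilities = itertools.product(charset, repeat=i)
--         for poss in possibilities:
--             yield poss
-- ===== SOURCE B (Python) =====
-- def or_bruteforce_generator(word_size, charset, size_is_exact):
--     # Build each length's tuples by extending the previous length's tuples on
--     # the right (last coordinate fastest), reusing one accumulator across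
--     # lengths instead of calling itertools.product per length.
--     if size_is_exact and word_size < 0:
--         raise ValueError("negative exact word size")
--     acc = [()]
--     if size_is_exact:
--         for _ in range(word_size):
--             acc = [t + (c,) for t in acc for c in charset]
--         yield from acc
--     else:
--         for _ in range(word_size):
--             acc = [t + (c,) for t in acc for c in charset]
--             yield from acc
-- ===== Notes on version B (the rewrite author's own statement) =====
-- stated objective: alternative
-- what changed: B replaces the per-length itertools.product calls (prefix recursion, recomputed from scratch for every length) with a single incremental accumulator that extends the previous length's tuples on the right, emitting as it goes.
import Mathlib
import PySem

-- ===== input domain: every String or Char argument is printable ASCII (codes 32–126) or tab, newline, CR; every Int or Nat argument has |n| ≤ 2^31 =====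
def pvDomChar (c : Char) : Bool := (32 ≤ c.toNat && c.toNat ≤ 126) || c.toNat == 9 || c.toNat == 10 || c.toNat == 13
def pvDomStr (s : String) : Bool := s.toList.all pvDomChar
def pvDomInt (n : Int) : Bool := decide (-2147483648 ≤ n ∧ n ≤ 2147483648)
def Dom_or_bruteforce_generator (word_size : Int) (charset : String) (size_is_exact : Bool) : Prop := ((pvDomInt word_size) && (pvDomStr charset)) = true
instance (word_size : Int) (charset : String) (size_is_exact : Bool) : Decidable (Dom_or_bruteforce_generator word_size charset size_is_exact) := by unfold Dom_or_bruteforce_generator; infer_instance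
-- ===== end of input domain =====

-- B builds each length by extending the previous length's tuples on the right with one
-- reused accumulator, instead of A's per-length itertools.product (prefix recursion).


-- ===== PORT A =====
-- itertools.product(charset, repeat=n): first coordinate varies slowest (prefix recursion)
def pyProduct (cs : List String) (n : Nat) : List (List String) :=
  match n with
  | 0 => [[]]
  | n + 1 => cs.flatMap (fun c => (pyProduct cs n).map (fun t => c :: t))

-- A's while loop: while i < word_size: i += 1; yield from product(charset, repeat=i)
def loopA (cs : List String) (i ws : Int) : List (List String) :=
  if h : i < ws then
    pyProduct cs (i + 1).toNat ++ loopA cs (i + 1) ws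
  else []
termination_by (ws - i).toNat
decreasing_by omega

def or_bruteforce_generator (word_size : Int) (charset : String) (size_is_exact : Bool) : List (List String) :=
  let cs := charset.toList.map (fun c => String.mk [c])
  let i : Int := if size_is_exact then word_size - 1 else 0
  loopA cs i word_size

-- ===== PORT B =====
-- acc = [t + (c,) for t in acc for c in charset]
def extendAll (cs : List String) (acc : List (List String)) : List (List String) :=
  acc.flatMap (fun t => cs.map (fun c => t ++ [c]))

def or_bruteforce_generator_alt (word_size : Int) (charset : String) (size_is_exact : Bool) : List (List String) :=
  let cs := charset.toList.map (fun c => String.mk [c])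
  if size_is_exact then
    -- (Source B raises ValueError here when word_size < 0; that input is outside Pre_)
    (List.range word_size.toNat).foldl (fun acc _ => extendAll cs acc) [[]]
  else
    ((List.range word_size.toNat).foldl
      (fun (p : List (List String) × List (List String)) _ =>
        let acc := extendAll cs p.1
        (acc, p.2 ++ acc))
      ([[]], [])).2

-- ===== PRECONDITION & SPEC =====
-- Pre_ excludes only (size_is_exact = true ∧ word_size < 0), where A (and B) raise ValueError.
def Pre_or_bruteforce_generator (word_size : Int) (charset : String) (size_is_exact : Bool) : Prop :=
  size_is_exact = true → 0 ≤ word_size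
instance (word_size : Int) (charset : String) (size_is_exact : Bool) : Decidable (Pre_or_bruteforce_generator word_size charset size_is_exact) := by unfold Pre_or_bruteforce_generator; infer_instance

def pvWitness_or_bruteforce_generator : Int × String × Bool := (2, "ab", true)

def Spec_or_bruteforce_generator (word_size : Int) (charset : String) (size_is_exact : Bool) (out : List (List String)) : Prop := out = or_bruteforce_generator_alt word_size charset size_is_exact
instance (word_size : Int) (charset : String) (size_is_exact : Bool) (out : List (List String)) : Decidable (Spec_or_bruteforce_generator word_size charset size_is_exact out) := by unfold Spec_or_bruteforce_generator; infer_instance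

-- ===== CLAIM (what is proved, stated in full; the proofs are below) =====
def Claim_equal_or_bruteforce_generator : Prop := ∀ (word_size : Int) (charset : String) (size_is_exact : Bool), Dom_or_bruteforce_generator word_size charset size_is_exact → Pre_or_bruteforce_generator word_size charset size_is_exact → Spec_or_bruteforce_generator word_size charset size_is_exact (or_bruteforce_generator word_size charset size_is_exact)

-- ===== LEMMAS AND PROOFS =====

-- Extending every length-n tuple on the right gives exactly product at length n+1.
theorem extendAll_pyProduct (cs : List String) (n : Nat) :
    extendAll cs (pyProduct cs n) = pyProduct cs (n + 1) := by
  induction n with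
  | zero =>
    simp only [pyProduct, extendAll]
    induction cs with
    | nil => rfl
    | cons c cs ih => simp_all [List.flatMap]
  | succ n ih =>
    have hmap : ∀ (c : String) (l : List (List String)),
        extendAll cs (l.map (fun t => c :: t)) = (extendAll cs l).map (fun t => c :: t) := by
      intro c l
      simp only [extendAll, List.flatMap_map, List.map_flatMap, List.map_map]
      rfl
    have hfm : ∀ (f : String → List (List String)),
        extendAll cs (cs.flatMap f) = cs.flatMap (fun c => extendAll cs (f c)) := by
      intro f; simp [extendAll, List.flatMap_assoc]
    show extendAll cs (cs.flatMap fun c => (pyProduct cs n).map (fun t => c :: t)) = _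
    rw [hfm]
    simp only [hmap, ih]
    rfl

theorem foldl_extend (cs : List String) (n : Nat) :
    (List.range n).foldl (fun acc _ => extendAll cs acc) [[]] = pyProduct cs n := by
  induction n with
  | zero => simp [pyProduct]
  | succ n ih => rw [List.range_succ, List.foldl_append, ih]; simpa using extendAll_pyProduct cs n

-- concatenation of pyProduct at lengths k+1 … k+m
def catProd (cs : List String) (k m : Nat) : List (List String) :=
  match m with
  | 0 => []
  | m + 1 => pyProduct cs (k + 1) ++ catProd cs (k + 1) m

theorem loopA_eq_catProd (cs : List String) : ∀ (m : Nat) (i ws : Int), 0 ≤ i →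
    (ws - i).toNat = m → loopA cs i ws = catProd cs i.toNat m := by
  intro m
  induction m with
  | zero =>
    intro i ws hi hm
    rw [loopA]; rw [dif_neg (by omega)]; rfl
  | succ m ih =>
    intro i ws hi hm
    rw [loopA, dif_pos (by omega)]
    have h1 : (i + 1).toNat = i.toNat + 1 := by omega
    rw [ih (i + 1) ws (by omega) (by omega), h1]
    rfl

theorem foldl_pair (cs : List String) :
    ∀ (l : List Nat) (k : Nat) (out : List (List String)),
    (l.foldl (fun (p : List (List String) × List (List String)) _ =>
        (extendAll cs p.1, p.2 ++ extendAll cs p.1)) (pyProduct cs k, out)).2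
      = out ++ catProd cs k l.length := by
  intro l
  induction l with
  | nil => intro k out; simp [catProd]
  | cons x l ih =>
    intro k out
    simp only [List.foldl_cons, extendAll_pyProduct]
    rw [ih (k + 1) (out ++ pyProduct cs (k + 1))]
    simp [catProd]

-- ===== VERDICT (by name: the statement is the Claim_ definition above) =====
theorem or_bruteforce_generator_spec : Claim_equal_or_bruteforce_generator := by
  intro ws charset ex _ hpre
  unfold Spec_or_bruteforce_generator or_bruteforce_generator or_bruteforce_generator_alt
  set cs := charset.toList.map (fun c => String.mk [c]) with hcs
  cases ex with
  | false =>
    simp only [if_false, Bool.false_eq_true]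
    have h := foldl_pair cs (List.range ws.toNat) 0 []
    simp only [pyProduct, List.length_range, List.nil_append] at h
    rw [h, loopA_eq_catProd cs ws.toNat 0 ws le_rfl (by omega)]
    rfl
  | true =>
    simp only [if_true]
    rw [foldl_extend]
    have h : ws - 1 + 1 = ws := by omega
    rw [loopA, dif_pos (show ws - 1 < ws by omega), h, loopA, dif_neg (show ¬ ws < ws by omega)]
    simp
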